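-- pv_equiv track=rewrite | github.com/Uninett/telemator-NAV-integrasjon | navtelemator/views/circuit.py | get_startstop_slice
-- ===== SOURCE A (Python) =====
-- def get_startstop_slice(slices, start, stop):
--   out = {}
--   for (index, slice) in enumerate(slices):
--     # Find start slice
--     for b in slice:
--       if start in b:
--         out["start"] = index
--       if stop in b:
--         out["stop"] = index
--   return out
-- ===== SOURCE B (Python) =====
-- def get_startstop_slice(slices, start, stop):
--     i_start = i_stop = None
--     for index, sl in reversed(list(enumerate(slices))):
--         if i_start is None and any(start in b for b in sl):
--             i_start = index
--         if i_stop is None and any(stop in b for b in sl):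
--             i_stop = index
--         if i_start is not None and i_stop is not None:
--             break
--     out = {}
--     if i_start is not None:
--         out["start"] = i_start
--     if i_stop is not None:
--         out["stop"] = i_stop
--     return out
-- ===== Notes on version B (the rewrite author's own statement) =====
-- stated objective: alternative
-- what changed: A scans every string of every slice updating a dict; B walks the slices in reverse with an early break, recording for each of start/stop independently the first reverse (= last forward) slice that contains it, then assembles the result dict.
-- outside the precondition, e.g. on get_startstop_slice([['b'], ['a']], 'a', 'b'): A returns {'stop': 0, 'start': 1}, B returns {'start': 1, 'stop': 0}
import Mathlib
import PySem

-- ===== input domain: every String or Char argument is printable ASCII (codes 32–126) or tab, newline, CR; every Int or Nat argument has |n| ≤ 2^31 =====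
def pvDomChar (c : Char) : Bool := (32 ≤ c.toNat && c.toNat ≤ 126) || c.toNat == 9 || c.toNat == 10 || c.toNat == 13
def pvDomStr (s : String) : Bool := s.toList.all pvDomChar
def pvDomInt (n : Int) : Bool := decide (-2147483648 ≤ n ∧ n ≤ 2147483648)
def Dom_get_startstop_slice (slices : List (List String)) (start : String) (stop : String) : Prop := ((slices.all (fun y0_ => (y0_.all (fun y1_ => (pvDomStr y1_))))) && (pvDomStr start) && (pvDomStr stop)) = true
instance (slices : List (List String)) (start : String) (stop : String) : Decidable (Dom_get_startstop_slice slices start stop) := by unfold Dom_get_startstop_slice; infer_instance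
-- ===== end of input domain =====

-- B replaces A's full nested scan by a reverse traversal with early exit that records the
-- first (i.e. last-forward) slice containing each of start/stop independently (objective: alternative).


-- ===== PORT A =====
def get_startstop_slice (slices : List (List String)) (start : String) (stop : String) : List (String × Int) :=
  ((PySem.List.enumerate slices 0).foldl (fun out p =>
      p.2.foldl (fun out b =>
        let out := if PySem.Str.isIn start b then out.insert "start" p.1 else out
        if PySem.Str.isIn stop b then out.insert "stop" p.1 else out) out)
    PySem.Dict.empty).items

-- ===== PORT B =====
def altLoop (start : String) (stop : String) : List (Int × List String) → Option Int → Option Int → Option Int × Option Int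
  | [], iS, iT => (iS, iT)
  | (index, sl) :: rest, iS, iT =>
    let iS := if iS = none ∧ sl.any (fun b => PySem.Str.isIn start b) then some index else iS
    let iT := if iT = none ∧ sl.any (fun b => PySem.Str.isIn stop b) then some index else iT
    if iS ≠ none ∧ iT ≠ none then (iS, iT) else altLoop start stop rest iS iT

def get_startstop_slice_alt (slices : List (List String)) (start : String) (stop : String) : List (String × Int) :=
  let p := altLoop start stop (PySem.List.enumerate slices 0).reverse none none
  let out : PySem.Dict String Int := PySem.Dict.empty
  let out := match p.1 with | some v => out.insert "start" v | none => out
  let out := match p.2 with | some v => out.insert "stop" v | none => out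
  out.items

-- ===== PRECONDITION & SPEC =====
-- Pre_ excludes inputs on which both substrings occur but stop's first (flattened) occurrence strictly
-- precedes start's: there A's dict lists "stop" before "start" while B always lists "start" first —
-- an accidental dict-insertion-order corner where either order is defensible.
def Pre_get_startstop_slice (slices : List (List String)) (start : String) (stop : String) : Prop :=
  let flat := slices.flatMap id
  flat.findIdx (fun b => PySem.Str.isIn start b) ≤ flat.findIdx (fun b => PySem.Str.isIn stop b)
    ∨ flat.findIdx (fun b => PySem.Str.isIn start b) = flat.length
instance (slices : List (List String)) (start : String) (stop : String) : Decidable (Pre_get_startstop_slice slices start stop) := by unfold Pre_get_startstop_slice; infer_instance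

def pvWitness_get_startstop_slice : List (List String) × String × String := ([["ab"], ["b"]], "a", "b")

def Spec_get_startstop_slice (slices : List (List String)) (start : String) (stop : String) (out : List (String × Int)) : Prop := out = get_startstop_slice_alt slices start stop
instance (slices : List (List String)) (start : String) (stop : String) (out : List (String × Int)) : Decidable (Spec_get_startstop_slice slices start stop out) := by unfold Spec_get_startstop_slice; infer_instance

-- ===== CLAIM (what is proved, stated in full; the proofs are below) =====
def Claim_equal_get_startstop_slice : Prop := ∀ (slices : List (List String)) (start : String) (stop : String), Dom_get_startstop_slice slices start stop → Pre_get_startstop_slice slices start stop → Spec_get_startstop_slice slices start stop (get_startstop_slice slices start stop)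

-- ===== LEMMAS AND PROOFS =====

-- A's two loop bodies, named (definitionally equal to the folds in port A)
def stepA (start stop : String) (i : Int) (d : PySem.Dict String Int) (b : String) : PySem.Dict String Int :=
  let d := if PySem.Str.isIn start b then d.insert "start" i else d
  if PySem.Str.isIn stop b then d.insert "stop" i else d

def innerA (start stop : String) (i : Int) (d : PySem.Dict String Int) (sl : List String) : PySem.Dict String Int :=
  sl.foldl (stepA start stop i) d

def outerA (start stop : String) (l : List (Int × List String)) (d : PySem.Dict String Int) : PySem.Dict String Int :=
  l.foldl (fun out p => innerA start stop p.1 out p.2) d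

-- last forward index (counting from offset i0) of a slice containing q
def lastIdx (q : String) : List (List String) → Int → Option Int
  | [], _ => none
  | sl :: rest, i0 =>
    match lastIdx q rest (i0 + 1) with
    | some v => some v
    | none => if sl.any (fun y => PySem.Str.isIn q y) then some i0 else none

-- which of start/stop matches first in a flat list of strings (0 start, 1 stop, 2 neither)
def lead (start stop : String) : List String → Nat
  | [] => 2
  | b :: bs => if PySem.Str.isIn start b then 0 else if PySem.Str.isIn stop b then 1 else lead start stop bs

theorem A_eq (slices : List (List String)) (start stop : String) :
    get_startstop_slice slices start stop = (outerA start stop (PySem.List.enumerate slices 0) PySem.Dict.empty).items := rfl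

-- literal dict computations
theorem insS_empty (v : Int) : (PySem.Dict.empty : PySem.Dict String Int).insert "start" v = PySem.Dict.mk [("start", v)] := rfl
theorem insT_empty (v : Int) : (PySem.Dict.empty : PySem.Dict String Int).insert "stop" v = PySem.Dict.mk [("stop", v)] := rfl
theorem insS_DS (a v : Int) : (PySem.Dict.mk [("start", a)]).insert "start" v = PySem.Dict.mk [("start", v)] := rfl
theorem insT_DS (a v : Int) : (PySem.Dict.mk [("start", a)]).insert "stop" v = PySem.Dict.mk [("start", a), ("stop", v)] := rfl
theorem insS_DT (b v : Int) : (PySem.Dict.mk [("stop", b)]).insert "start" v = PySem.Dict.mk [("stop", b), ("start", v)] := rfl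
theorem insT_DT (b v : Int) : (PySem.Dict.mk [("stop", b)]).insert "stop" v = PySem.Dict.mk [("stop", v)] := rfl
theorem insS_DST (a b v : Int) : (PySem.Dict.mk [("start", a), ("stop", b)]).insert "start" v = PySem.Dict.mk [("start", v), ("stop", b)] := rfl
theorem insT_DST (a b v : Int) : (PySem.Dict.mk [("start", a), ("stop", b)]).insert "stop" v = PySem.Dict.mk [("start", a), ("stop", v)] := rfl
theorem insS_DTS (a b v : Int) : (PySem.Dict.mk [("stop", b), ("start", a)]).insert "start" v = PySem.Dict.mk [("stop", b), ("start", v)] := rfl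
theorem insT_DTS (a b v : Int) : (PySem.Dict.mk [("stop", b), ("start", a)]).insert "stop" v = PySem.Dict.mk [("stop", v), ("start", a)] := rfl

theorem innerA_DST (start stop : String) (i : Int) (sl : List String) : ∀ (a b : Int),
    innerA start stop i (PySem.Dict.mk [("start", a), ("stop", b)]) sl =
      PySem.Dict.mk [("start", if sl.any (fun y => PySem.Str.isIn start y) then i else a),
                     ("stop", if sl.any (fun y => PySem.Str.isIn stop y) then i else b)] := by
  induction sl with
  | nil => intro a b; rfl
  | cons x xs ih =>
    intro a b
    show innerA start stop i (stepA start stop i (PySem.Dict.mk [("start", a), ("stop", b)]) x) xs = _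
    by_cases h1 : PySem.Str.isIn start x = true <;> by_cases h2 : PySem.Str.isIn stop x = true <;>
      simp only [Bool.not_eq_true] at h1 h2
    · rw [show stepA start stop i (PySem.Dict.mk [("start", a), ("stop", b)]) x = PySem.Dict.mk [("start", i), ("stop", i)] from by
        simp only [stepA, h1, h2, if_true, insS_DST, insT_DST], ih]
      simp only [List.any_cons, h1, h2, Bool.true_or, Bool.false_or, ite_self, if_true]
    · rw [show stepA start stop i (PySem.Dict.mk [("start", a), ("stop", b)]) x = PySem.Dict.mk [("start", i), ("stop", b)] from by
        simp only [stepA, h1, h2, if_true, Bool.false_eq_true, if_false, insS_DST], ih]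
      simp only [List.any_cons, h1, h2, Bool.true_or, Bool.false_or, ite_self, if_true]
    · rw [show stepA start stop i (PySem.Dict.mk [("start", a), ("stop", b)]) x = PySem.Dict.mk [("start", a), ("stop", i)] from by
        simp only [stepA, h1, h2, if_true, Bool.false_eq_true, if_false, insT_DST], ih]
      simp only [List.any_cons, h1, h2, Bool.true_or, Bool.false_or, ite_self, if_true]
    · rw [show stepA start stop i (PySem.Dict.mk [("start", a), ("stop", b)]) x = PySem.Dict.mk [("start", a), ("stop", b)] from by
        simp only [stepA, h1, h2, Bool.false_eq_true, if_false], ih]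
      simp only [List.any_cons, h1, h2, Bool.true_or, Bool.false_or, ite_self, if_true]

theorem innerA_DTS (start stop : String) (i : Int) (sl : List String) : ∀ (a b : Int),
    innerA start stop i (PySem.Dict.mk [("stop", b), ("start", a)]) sl =
      PySem.Dict.mk [("stop", if sl.any (fun y => PySem.Str.isIn stop y) then i else b),
                     ("start", if sl.any (fun y => PySem.Str.isIn start y) then i else a)] := by
  induction sl with
  | nil => intro a b; rfl
  | cons x xs ih =>
    intro a b
    show innerA start stop i (stepA start stop i (PySem.Dict.mk [("stop", b), ("start", a)]) x) xs = _
    by_cases h1 : PySem.Str.isIn start x = true <;> by_cases h2 : PySem.Str.isIn stop x = true <;>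
      simp only [Bool.not_eq_true] at h1 h2
    · rw [show stepA start stop i (PySem.Dict.mk [("stop", b), ("start", a)]) x = PySem.Dict.mk [("stop", i), ("start", i)] from by
        simp only [stepA, h1, h2, if_true, insS_DTS, insT_DTS], ih]
      simp only [List.any_cons, h1, h2, Bool.true_or, Bool.false_or, ite_self, if_true]
    · rw [show stepA start stop i (PySem.Dict.mk [("stop", b), ("start", a)]) x = PySem.Dict.mk [("stop", b), ("start", i)] from by
        simp only [stepA, h1, h2, if_true, Bool.false_eq_true, if_false, insS_DTS], ih]
      simp only [List.any_cons, h1, h2, Bool.true_or, Bool.false_or, ite_self, if_true]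
    · rw [show stepA start stop i (PySem.Dict.mk [("stop", b), ("start", a)]) x = PySem.Dict.mk [("stop", i), ("start", a)] from by
        simp only [stepA, h1, h2, if_true, Bool.false_eq_true, if_false, insT_DTS], ih]
      simp only [List.any_cons, h1, h2, Bool.true_or, Bool.false_or, ite_self, if_true]
    · rw [show stepA start stop i (PySem.Dict.mk [("stop", b), ("start", a)]) x = PySem.Dict.mk [("stop", b), ("start", a)] from by
        simp only [stepA, h1, h2, Bool.false_eq_true, if_false], ih]
      simp only [List.any_cons, h1, h2, Bool.true_or, Bool.false_or, ite_self, if_true]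

theorem innerA_DS (start stop : String) (i : Int) (sl : List String) : ∀ (a : Int),
    innerA start stop i (PySem.Dict.mk [("start", a)]) sl =
      (if sl.any (fun y => PySem.Str.isIn stop y) then
        PySem.Dict.mk [("start", if sl.any (fun y => PySem.Str.isIn start y) then i else a), ("stop", i)]
      else
        PySem.Dict.mk [("start", if sl.any (fun y => PySem.Str.isIn start y) then i else a)]) := by
  induction sl with
  | nil => intro a; rfl
  | cons x xs ih =>
    intro a
    show innerA start stop i (stepA start stop i (PySem.Dict.mk [("start", a)]) x) xs = _
    by_cases h1 : PySem.Str.isIn start x = true <;> by_cases h2 : PySem.Str.isIn stop x = true <;>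
      simp only [Bool.not_eq_true] at h1 h2
    · rw [show stepA start stop i (PySem.Dict.mk [("start", a)]) x = PySem.Dict.mk [("start", i), ("stop", i)] from by
        simp only [stepA, h1, h2, if_true, insS_DS, insT_DS], innerA_DST]
      simp only [List.any_cons, h1, h2, Bool.true_or, Bool.false_or, ite_self, if_true]
    · rw [show stepA start stop i (PySem.Dict.mk [("start", a)]) x = PySem.Dict.mk [("start", i)] from by
        simp only [stepA, h1, h2, if_true, Bool.false_eq_true, if_false, insS_DS], ih]
      simp only [List.any_cons, h1, h2, Bool.true_or, Bool.false_or, ite_self, if_true]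
    · rw [show stepA start stop i (PySem.Dict.mk [("start", a)]) x = PySem.Dict.mk [("start", a), ("stop", i)] from by
        simp only [stepA, h1, h2, if_true, Bool.false_eq_true, if_false, insT_DS], innerA_DST]
      simp only [List.any_cons, h1, h2, Bool.true_or, Bool.false_or, ite_self, if_true]
    · rw [show stepA start stop i (PySem.Dict.mk [("start", a)]) x = PySem.Dict.mk [("start", a)] from by
        simp only [stepA, h1, h2, Bool.false_eq_true, if_false], ih]
      simp only [List.any_cons, h1, h2, Bool.true_or, Bool.false_or, ite_self, if_true]

theorem innerA_DT (start stop : String) (i : Int) (sl : List String) : ∀ (b : Int),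
    innerA start stop i (PySem.Dict.mk [("stop", b)]) sl =
      (if sl.any (fun y => PySem.Str.isIn start y) then
        PySem.Dict.mk [("stop", if sl.any (fun y => PySem.Str.isIn stop y) then i else b), ("start", i)]
      else
        PySem.Dict.mk [("stop", if sl.any (fun y => PySem.Str.isIn stop y) then i else b)]) := by
  induction sl with
  | nil => intro b; rfl
  | cons x xs ih =>
    intro b
    show innerA start stop i (stepA start stop i (PySem.Dict.mk [("stop", b)]) x) xs = _
    by_cases h1 : PySem.Str.isIn start x = true <;> by_cases h2 : PySem.Str.isIn stop x = true <;>
      simp only [Bool.not_eq_true] at h1 h2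
    · rw [show stepA start stop i (PySem.Dict.mk [("stop", b)]) x = PySem.Dict.mk [("stop", i), ("start", i)] from by
        simp only [stepA, h1, h2, if_true, insS_DT, insT_DTS], innerA_DTS]
      simp only [List.any_cons, h1, h2, Bool.true_or, Bool.false_or, ite_self, if_true]
    · rw [show stepA start stop i (PySem.Dict.mk [("stop", b)]) x = PySem.Dict.mk [("stop", b), ("start", i)] from by
        simp only [stepA, h1, h2, if_true, Bool.false_eq_true, if_false, insS_DT], innerA_DTS]
      simp only [List.any_cons, h1, h2, Bool.true_or, Bool.false_or, ite_self, if_true]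
    · rw [show stepA start stop i (PySem.Dict.mk [("stop", b)]) x = PySem.Dict.mk [("stop", i)] from by
        simp only [stepA, h1, h2, if_true, Bool.false_eq_true, if_false, insT_DT], ih]
      simp only [List.any_cons, h1, h2, Bool.true_or, Bool.false_or, ite_self, if_true]
    · rw [show stepA start stop i (PySem.Dict.mk [("stop", b)]) x = PySem.Dict.mk [("stop", b)] from by
        simp only [stepA, h1, h2, Bool.false_eq_true, if_false], ih]
      simp only [List.any_cons, h1, h2, Bool.true_or, Bool.false_or, ite_self, if_true]

theorem innerA_empty (start stop : String) (i : Int) (sl : List String) :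
    innerA start stop i PySem.Dict.empty sl =
      (if sl.any (fun y => PySem.Str.isIn start y) then
        (if sl.any (fun y => PySem.Str.isIn stop y) then
          (if lead start stop sl = 1 then PySem.Dict.mk [("stop", i), ("start", i)]
           else PySem.Dict.mk [("start", i), ("stop", i)])
         else PySem.Dict.mk [("start", i)])
       else
        (if sl.any (fun y => PySem.Str.isIn stop y) then PySem.Dict.mk [("stop", i)]
         else PySem.Dict.empty)) := by
  induction sl with
  | nil => rfl
  | cons x xs ih =>
    show innerA start stop i (stepA start stop i PySem.Dict.empty x) xs = _
    by_cases h1 : PySem.Str.isIn start x = true <;> by_cases h2 : PySem.Str.isIn stop x = true <;>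
      simp only [Bool.not_eq_true] at h1 h2 <;>
      (have h1c := h1; have h2c := h2; simp only [PySem.Str.isIn_eq] at h1c h2c)
    · rw [show stepA start stop i PySem.Dict.empty x = PySem.Dict.mk [("start", i), ("stop", i)] from by
        simp only [stepA, h1, h2, if_true, insS_empty, insT_DS], innerA_DST]
      simp [lead, List.any_cons, h1, h2, h1c, h2c]
    · rw [show stepA start stop i PySem.Dict.empty x = PySem.Dict.mk [("start", i)] from by
        simp only [stepA, h1, h2, if_true, Bool.false_eq_true, if_false, insS_empty], innerA_DS]
      simp [lead, List.any_cons, h1, h2, h1c, h2c]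
    · rw [show stepA start stop i PySem.Dict.empty x = PySem.Dict.mk [("stop", i)] from by
        simp only [stepA, h1, h2, if_true, Bool.false_eq_true, if_false, insT_empty], innerA_DT]
      simp [lead, List.any_cons, h1, h2, h1c, h2c]
    · rw [show stepA start stop i PySem.Dict.empty x = PySem.Dict.empty from by
        simp only [stepA, h1, h2, Bool.false_eq_true, if_false], ih]
      simp [lead, List.any_cons, h1, h2, h1c, h2c]

-- lastIdx unfolding helpers
theorem lastIdx_cons (q : String) (sl : List String) (rest : List (List String)) (i0 : Int) :
    lastIdx q (sl :: rest) i0 =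
      match lastIdx q rest (i0 + 1) with
      | some v => some v
      | none => if sl.any (fun y => PySem.Str.isIn q y) then some i0 else none := rfl

theorem lastIdx_cons_getD (q : String) (sl : List String) (rest : List (List String)) (i0 a : Int) :
    (lastIdx q (sl :: rest) i0).getD a =
      (lastIdx q rest (i0 + 1)).getD (if sl.any (fun y => PySem.Str.isIn q y) then i0 else a) := by
  rw [lastIdx_cons]
  cases lastIdx q rest (i0 + 1) <;> [skip; rfl]
  split_ifs <;> rfl

theorem outerA_DST (start stop : String) (slices : List (List String)) : ∀ (i0 a b : Int),
    outerA start stop (PySem.List.enumerate slices i0) (PySem.Dict.mk [("start", a), ("stop", b)]) =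
      PySem.Dict.mk [("start", (lastIdx start slices i0).getD a), ("stop", (lastIdx stop slices i0).getD b)] := by
  induction slices with
  | nil => intro i0 a b; rfl
  | cons sl rest ih =>
    intro i0 a b
    rw [PySem.List.enumerate_cons]
    show outerA start stop (PySem.List.enumerate rest (i0 + 1))
        (innerA start stop i0 (PySem.Dict.mk [("start", a), ("stop", b)]) sl) = _
    rw [innerA_DST, ih, lastIdx_cons_getD, lastIdx_cons_getD]

theorem outerA_DTS (start stop : String) (slices : List (List String)) : ∀ (i0 a b : Int),
    outerA start stop (PySem.List.enumerate slices i0) (PySem.Dict.mk [("stop", b), ("start", a)]) =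
      PySem.Dict.mk [("stop", (lastIdx stop slices i0).getD b), ("start", (lastIdx start slices i0).getD a)] := by
  induction slices with
  | nil => intro i0 a b; rfl
  | cons sl rest ih =>
    intro i0 a b
    rw [PySem.List.enumerate_cons]
    show outerA start stop (PySem.List.enumerate rest (i0 + 1))
        (innerA start stop i0 (PySem.Dict.mk [("stop", b), ("start", a)]) sl) = _
    rw [innerA_DTS, ih, lastIdx_cons_getD, lastIdx_cons_getD]

theorem outerA_DS (start stop : String) (slices : List (List String)) : ∀ (i0 a : Int),
    outerA start stop (PySem.List.enumerate slices i0) (PySem.Dict.mk [("start", a)]) =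
      (match lastIdx stop slices i0 with
       | none => PySem.Dict.mk [("start", (lastIdx start slices i0).getD a)]
       | some b => PySem.Dict.mk [("start", (lastIdx start slices i0).getD a), ("stop", b)]) := by
  induction slices with
  | nil => intro i0 a; rfl
  | cons sl rest ih =>
    intro i0 a
    rw [PySem.List.enumerate_cons]
    show outerA start stop (PySem.List.enumerate rest (i0 + 1))
        (innerA start stop i0 (PySem.Dict.mk [("start", a)]) sl) = _
    rw [innerA_DS]
    by_cases ht : sl.any (fun y => PySem.Str.isIn stop y) = true
    · rw [if_pos ht, outerA_DST, lastIdx_cons_getD, lastIdx_cons (q := stop)]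
      cases h : lastIdx stop rest (i0 + 1)
      · rw [if_pos ht]; rfl
      · rfl
    · simp only [Bool.not_eq_true] at ht
      have htn : ¬((sl.any fun y => PySem.Str.isIn stop y) = true) := by rw [ht]; exact Bool.false_ne_true
      rw [if_neg htn, ih, lastIdx_cons_getD, lastIdx_cons (q := stop)]
      cases h : lastIdx stop rest (i0 + 1)
      · rw [if_neg htn]
      · rfl

theorem outerA_DT (start stop : String) (slices : List (List String)) : ∀ (i0 b : Int),
    outerA start stop (PySem.List.enumerate slices i0) (PySem.Dict.mk [("stop", b)]) =
      (match lastIdx start slices i0 with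
       | none => PySem.Dict.mk [("stop", (lastIdx stop slices i0).getD b)]
       | some a => PySem.Dict.mk [("stop", (lastIdx stop slices i0).getD b), ("start", a)]) := by
  induction slices with
  | nil => intro i0 b; rfl
  | cons sl rest ih =>
    intro i0 b
    rw [PySem.List.enumerate_cons]
    show outerA start stop (PySem.List.enumerate rest (i0 + 1))
        (innerA start stop i0 (PySem.Dict.mk [("stop", b)]) sl) = _
    rw [innerA_DT]
    by_cases hs : sl.any (fun y => PySem.Str.isIn start y) = true
    · rw [if_pos hs, outerA_DTS, lastIdx_cons_getD, lastIdx_cons (q := start)]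
      cases h : lastIdx start rest (i0 + 1)
      · rw [if_pos hs]; rfl
      · rfl
    · simp only [Bool.not_eq_true] at hs
      have hsn : ¬((sl.any fun y => PySem.Str.isIn start y) = true) := by rw [hs]; exact Bool.false_ne_true
      rw [if_neg hsn, ih, lastIdx_cons_getD, lastIdx_cons (q := start)]
      cases h : lastIdx start rest (i0 + 1)
      · rw [if_neg hsn]
      · rfl

-- lead facts
theorem lead_append (start stop : String) (xs ys : List String) :
    lead start stop (xs ++ ys) = if lead start stop xs = 2 then lead start stop ys else lead start stop xs := by
  induction xs with
  | nil => rfl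
  | cons x xs ih =>
    by_cases p : PySem.Str.isIn start x = true <;> by_cases q : PySem.Str.isIn stop x = true <;>
      (have pc := p; have qc := q; simp only [PySem.Str.isIn_eq] at pc qc; simp [lead, pc, qc, ih])

theorem lead_eq_zero (start stop : String) (sl : List String)
    (hs : sl.any (fun y => PySem.Str.isIn start y) = true)
    (ht : sl.any (fun y => PySem.Str.isIn stop y) = false) : lead start stop sl = 0 := by
  induction sl with
  | nil => simp at hs
  | cons x xs ih =>
    simp only [List.any_cons, Bool.or_eq_true, Bool.or_eq_false_iff] at hs ht
    show (if PySem.Str.isIn start x then (0 : Nat) else if PySem.Str.isIn stop x then 1 else lead start stop xs) = 0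
    split_ifs with p q
    · rfl
    · rw [ht.1] at q; cases q
    · exact ih (hs.resolve_left p) ht.2

theorem lead_eq_one (start stop : String) (sl : List String)
    (hs : sl.any (fun y => PySem.Str.isIn start y) = false)
    (ht : sl.any (fun y => PySem.Str.isIn stop y) = true) : lead start stop sl = 1 := by
  induction sl with
  | nil => simp at ht
  | cons x xs ih =>
    simp only [List.any_cons, Bool.or_eq_true, Bool.or_eq_false_iff] at hs ht
    show (if PySem.Str.isIn start x then (0 : Nat) else if PySem.Str.isIn stop x then 1 else lead start stop xs) = 1
    split_ifs with p q
    · rw [hs.1] at p; cases p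
    · rfl
    · exact ih hs.2 (ht.resolve_left q)

theorem lead_ne_two (start stop : String) (sl : List String)
    (hs : sl.any (fun y => PySem.Str.isIn start y) = true) : lead start stop sl ≠ 2 := by
  induction sl with
  | nil => simp at hs
  | cons x xs ih =>
    simp only [List.any_cons, Bool.or_eq_true] at hs
    show (if PySem.Str.isIn start x then (0 : Nat) else if PySem.Str.isIn stop x then 1 else lead start stop xs) ≠ 2
    split_ifs with p q
    · decide
    · decide
    · exact ih (hs.resolve_left p)

theorem lead_eq_two (start stop : String) (sl : List String)
    (hs : sl.any (fun y => PySem.Str.isIn start y) = false)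
    (ht : sl.any (fun y => PySem.Str.isIn stop y) = false) : lead start stop sl = 2 := by
  induction sl with
  | nil => rfl
  | cons x xs ih =>
    simp only [List.any_cons, Bool.or_eq_false_iff] at hs ht
    show (if PySem.Str.isIn start x then (0 : Nat) else if PySem.Str.isIn stop x then 1 else lead start stop xs) = 2
    split_ifs with p q
    · rw [hs.1] at p; cases p
    · rw [ht.1] at q; cases q
    · exact ih hs.2 ht.2

-- full characterisation of A
theorem outerA_empty (start stop : String) (slices : List (List String)) : ∀ (i0 : Int),
    outerA start stop (PySem.List.enumerate slices i0) PySem.Dict.empty =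
      (match lastIdx start slices i0, lastIdx stop slices i0 with
       | none, none => PySem.Dict.empty
       | some a, none => PySem.Dict.mk [("start", a)]
       | none, some b => PySem.Dict.mk [("stop", b)]
       | some a, some b =>
         if lead start stop (slices.flatMap id) = 1 then PySem.Dict.mk [("stop", b), ("start", a)]
         else PySem.Dict.mk [("start", a), ("stop", b)]) := by
  induction slices with
  | nil => intro i0; rfl
  | cons sl rest ih =>
    intro i0
    rw [PySem.List.enumerate_cons]
    show outerA start stop (PySem.List.enumerate rest (i0 + 1))
        (innerA start stop i0 PySem.Dict.empty sl) = _
    rw [innerA_empty, List.flatMap_cons, id, lead_append,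
      lastIdx_cons (q := start), lastIdx_cons (q := stop)]
    by_cases hs : (sl.any fun y => PySem.Str.isIn start y) = true <;>
      by_cases ht : (sl.any fun y => PySem.Str.isIn stop y) = true
    · -- both present in sl
      by_cases hl : lead start stop sl = 1
      · simp only [hs, ht, hl, eq_self_iff_true, if_true]
        rw [outerA_DTS]
        cases h1 : lastIdx start rest (i0 + 1) <;> cases h2 : lastIdx stop rest (i0 + 1) <;>
          simp [h1, h2]
      · simp only [hs, ht, eq_self_iff_true, if_true, if_neg hl]
        rw [outerA_DST]
        cases h1 : lastIdx start rest (i0 + 1) <;> cases h2 : lastIdx stop rest (i0 + 1) <;>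
          simp [h1, h2, hl, lead_ne_two start stop sl hs]
    · -- only start in sl
      simp only [Bool.not_eq_true] at ht
      simp only [hs, ht, eq_self_iff_true, if_true, Bool.false_eq_true, if_false,
        lead_eq_zero start stop sl hs ht]
      rw [outerA_DS]
      cases h1 : lastIdx start rest (i0 + 1) <;> cases h2 : lastIdx stop rest (i0 + 1) <;>
        simp [h1, h2]
    · -- only stop in sl
      simp only [Bool.not_eq_true] at hs
      simp only [hs, ht, eq_self_iff_true, if_true, Bool.false_eq_true, if_false,
        lead_eq_one start stop sl hs ht]
      rw [outerA_DT]
      cases h1 : lastIdx start rest (i0 + 1) <;> cases h2 : lastIdx stop rest (i0 + 1) <;>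
        simp [h1, h2]
    · -- neither in sl
      simp only [Bool.not_eq_true] at hs ht
      simp only [hs, ht, Bool.false_eq_true, if_false, lead_eq_two start stop sl hs ht]
      rw [ih]
      cases h1 : lastIdx start rest (i0 + 1) <;> cases h2 : lastIdx stop rest (i0 + 1) <;>
        simp [h1, h2]

-- ===== B side =====
theorem altLoop_some (start stop : String) (l : List (Int × List String)) (a b : Int) :
    altLoop start stop l (some a) (some b) = (some a, some b) := by
  cases l with
  | nil => rfl
  | cons p rest => cases p; simp [altLoop]

theorem altLoop_cons (start stop : String) (index : Int) (sl : List String)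
    (rest : List (Int × List String)) (iS iT : Option Int) :
    altLoop start stop ((index, sl) :: rest) iS iT =
      (if (if iS = none ∧ sl.any (fun b => PySem.Str.isIn start b) then some index else iS) ≠ none ∧
          (if iT = none ∧ sl.any (fun b => PySem.Str.isIn stop b) then some index else iT) ≠ none
       then ((if iS = none ∧ sl.any (fun b => PySem.Str.isIn start b) then some index else iS),
             (if iT = none ∧ sl.any (fun b => PySem.Str.isIn stop b) then some index else iT))
       else altLoop start stop rest
             (if iS = none ∧ sl.any (fun b => PySem.Str.isIn start b) then some index else iS)
             (if iT = none ∧ sl.any (fun b => PySem.Str.isIn stop b) then some index else iT)) := rfl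

theorem altLoop_append (start stop : String) (l1 l2 : List (Int × List String)) : ∀ (iS iT : Option Int),
    altLoop start stop (l1 ++ l2) iS iT =
      altLoop start stop l2 (altLoop start stop l1 iS iT).1 (altLoop start stop l1 iS iT).2 := by
  induction l1 with
  | nil => intro iS iT; rfl
  | cons p rest ih =>
    intro iS iT
    cases p with
    | mk index sl =>
      rw [List.cons_append, altLoop_cons, altLoop_cons]
      generalize (if iS = none ∧ sl.any (fun b => PySem.Str.isIn start b) then some index else iS) = iS'
      generalize (if iT = none ∧ sl.any (fun b => PySem.Str.isIn stop b) then some index else iT) = iT'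
      by_cases hc : iS' ≠ none ∧ iT' ≠ none
      · rw [if_pos hc, if_pos hc]
        obtain ⟨a, ha⟩ := Option.ne_none_iff_exists'.mp hc.1
        obtain ⟨b, hb⟩ := Option.ne_none_iff_exists'.mp hc.2
        rw [ha, hb, altLoop_some]
      · rw [if_neg hc, if_neg hc, ih]

theorem lastIdx_cons_ite (q : String) (sl : List String) (rest : List (List String)) (i0 : Int) :
    lastIdx q (sl :: rest) i0 =
      (if lastIdx q rest (i0 + 1) = none ∧ sl.any (fun y => PySem.Str.isIn q y) then some i0
       else lastIdx q rest (i0 + 1)) := by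
  rw [lastIdx_cons]
  cases h : lastIdx q rest (i0 + 1) <;> simp

theorem altLoop_enum (start stop : String) (slices : List (List String)) : ∀ (i0 : Int),
    altLoop start stop (PySem.List.enumerate slices i0).reverse none none =
      (lastIdx start slices i0, lastIdx stop slices i0) := by
  induction slices with
  | nil => intro i0; rfl
  | cons sl rest ih =>
    intro i0
    rw [PySem.List.enumerate_cons, List.reverse_cons, altLoop_append, ih]
    show altLoop start stop [(i0, sl)] _ _ = _
    simp only [altLoop]
    rw [← lastIdx_cons_ite, ← lastIdx_cons_ite]
    split_ifs <;> rfl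

theorem B_eq (slices : List (List String)) (start stop : String) :
    get_startstop_slice_alt slices start stop =
      (match lastIdx start slices 0, lastIdx stop slices 0 with
       | none, none => ([] : List (String × Int))
       | some a, none => [("start", a)]
       | none, some b => [("stop", b)]
       | some a, some b => [("start", a), ("stop", b)]) := by
  unfold get_startstop_slice_alt
  rw [altLoop_enum]
  cases h1 : lastIdx start slices 0 <;> cases h2 : lastIdx stop slices 0 <;> rfl

-- Pre implies the order of A's first insertions is "start" then "stop"
theorem findIdx_lt_of_any {α : Type} (p : α → Bool) (l : List α) (h : l.any p = true) :
    l.findIdx p < l.length := by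
  rw [List.findIdx_lt_length]
  simpa [List.any_eq_true] using h

theorem lead_ne_one_of_findIdx_le (start stop : String) (bs : List String)
    (h : bs.findIdx (fun y => PySem.Chars.isIn start.toList y.toList) ≤
         bs.findIdx (fun y => PySem.Chars.isIn stop.toList y.toList)) :
    lead start stop bs ≠ 1 := by
  induction bs with
  | nil => simp [lead]
  | cons x xs ih =>
    simp only [List.findIdx_cons] at h
    by_cases h1 : PySem.Chars.isIn start.toList x.toList = true
    · simp [lead, h1]
    · simp only [Bool.not_eq_true] at h1
      by_cases h2 : PySem.Chars.isIn stop.toList x.toList = true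
      · exfalso
        simp only [h1, h2, cond_false, cond_true] at h
        omega
      · simp only [Bool.not_eq_true] at h2
        simp only [h1, h2, cond_false] at h
        simp [lead, h1, h2, ih (by omega)]

theorem lastIdx_none_iff (q : String) (slices : List (List String)) : ∀ (i0 : Int),
    lastIdx q slices i0 = none ↔ (slices.flatMap id).any (fun y => PySem.Str.isIn q y) = false := by
  induction slices with
  | nil => intro i0; simp [lastIdx]
  | cons sl rest ih =>
    intro i0
    rw [lastIdx_cons, List.flatMap_cons, id, List.any_append]
    cases h : lastIdx q rest (i0 + 1)
    · by_cases ha : (sl.any fun y => PySem.Str.isIn q y) = true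
      · rw [if_pos ha]
        have hac := ha; simp only [PySem.Str.isIn_eq] at hac
        simp [hac]
      · simp only [Bool.not_eq_true] at ha
        rw [if_neg (by rw [ha]; exact Bool.false_ne_true)]
        have hr := (ih (i0 + 1)).mp h
        simp only [ha, hr, Bool.or_self]
    · have hr : ((rest.flatMap id).any fun y => PySem.Str.isIn q y) = true := by
        rcases hb : (rest.flatMap id).any (fun y => PySem.Str.isIn q y) with _ | _
        · exact absurd ((ih (i0 + 1)).mpr hb) (by simp [h])
        · rfl
      simp only [hr, Bool.or_true]
      simp

-- ===== VERDICT (by name: the statement is the Claim_ definition above) =====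
theorem get_startstop_slice_spec : Claim_equal_get_startstop_slice := by
  intro slices start stop hdom hpre
  unfold Spec_get_startstop_slice
  rw [A_eq, B_eq, outerA_empty]
  rcases h1 : lastIdx start slices 0 with _ | a <;> rcases h2 : lastIdx stop slices 0 with _ | b
  all_goals try rfl
  all_goals {
    have hany : (slices.flatMap id).any (fun y => PySem.Str.isIn start y) = true := by
      rcases hb : (slices.flatMap id).any (fun y => PySem.Str.isIn start y) with _ | _
      · rw [← lastIdx_none_iff start slices 0] at hb; simp [h1] at hb
      · rfl
    show (if lead start stop (List.flatMap id slices) = 1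
        then (PySem.Dict.mk [("stop", b), ("start", a)])
        else PySem.Dict.mk [("start", a), ("stop", b)]).items = [("start", a), ("stop", b)]
    unfold Pre_get_startstop_slice at hpre
    rcases hpre with hle | hlen
    · simp only [PySem.Str.isIn_eq] at hle
      rw [if_neg (lead_ne_one_of_findIdx_le start stop _ hle)]
    · exfalso
      have hlt := findIdx_lt_of_any (fun y => PySem.Str.isIn start y) (slices.flatMap id) hany
      omega }
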